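-- pv_equiv track=rewrite | github.com/Fanderman/NLP-Projects | P2-Z34.py | reverse_tags
-- ===== SOURCE A (Python) =====
-- def reverse_tags(tags, unigrams):
--     reversed_tags = {}
--     for word in tags:
--         if tags[word] not in reversed_tags:
--             reversed_tags[tags[word]] = []
--         weight = 1
--         if word in unigrams:
--             weight += unigrams[word]
--         reversed_tags[tags[word]].append((word, weight))
--
--     return reversed_tags
-- ===== SOURCE B (Python) =====
-- def reverse_tags(tags, unigrams):
--     tag_order = dict.fromkeys(tags[w] for w in tags)
--     return {t: [(w, 1 + unigrams.get(w, 0)) for w in tags if tags[w] == t]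
--             for t in tag_order}
-- ===== Notes on version B (the rewrite author's own statement) =====
-- stated objective: alternative
-- what changed: Replaces A's single mutating pass (init-if-absent dict of lists, append per word) with a distinct-tags-first decomposition: compute the distinct tags in first-appearance order, then build each tag's list by one scan of the words per tag, with unigrams.get(word, 0) folded into the weight.
import Mathlib
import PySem

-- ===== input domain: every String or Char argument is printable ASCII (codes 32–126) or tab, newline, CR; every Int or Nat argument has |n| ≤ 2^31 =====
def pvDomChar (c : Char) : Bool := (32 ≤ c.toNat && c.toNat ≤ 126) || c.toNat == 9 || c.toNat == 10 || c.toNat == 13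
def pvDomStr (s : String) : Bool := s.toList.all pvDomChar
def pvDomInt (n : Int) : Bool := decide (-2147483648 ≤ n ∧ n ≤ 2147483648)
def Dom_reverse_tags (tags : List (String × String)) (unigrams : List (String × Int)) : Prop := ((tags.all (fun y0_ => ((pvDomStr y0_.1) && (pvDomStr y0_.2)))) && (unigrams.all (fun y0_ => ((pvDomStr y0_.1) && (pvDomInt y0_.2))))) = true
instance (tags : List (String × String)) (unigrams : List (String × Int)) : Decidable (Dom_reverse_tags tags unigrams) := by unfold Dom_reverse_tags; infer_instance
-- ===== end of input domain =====

-- B groups by scanning the word list once per distinct tag (distinct-tags-first decomposition)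
-- instead of A's single pass that mutates a dict of lists; same return value (alternative, not faster).

-- ===== PORT A =====
-- A's single pass: for each word (dict iteration order), initialise the tag's list if absent,
-- compute weight = 1 (+ unigrams[word] if present) and append (word, weight).
def reverse_tags (tags : List (String × String)) (unigrams : List (String × Int)) : List (String × List (String × Int)) :=
  let td := PySem.Dict.ofList tags
  let ud := PySem.Dict.ofList unigrams
  let rt := td.items.foldl
    (fun (d : PySem.Dict String (List (String × Int))) p =>
      let d1 := if d.contains p.2 then d else d.insert p.2 []
      let weight : Int := if ud.contains p.1 then 1 + ud.getD p.1 0 else 1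
      d1.insert p.2 (d1.getD p.2 [] ++ [(p.1, weight)]))
    PySem.Dict.empty
  rt.items

-- ===== PORT B =====
-- B: distinct tags in first-appearance order (dict.fromkeys); per tag, one comprehension over the words.
def reverse_tags_alt (tags : List (String × String)) (unigrams : List (String × Int)) : List (String × List (String × Int)) :=
  let td := PySem.Dict.ofList tags
  let ud := PySem.Dict.ofList unigrams
  let tagOrder := PySem.List.dedup (td.items.map (fun p => p.2))
  tagOrder.map (fun t =>
    (t, (td.items.filter (fun p => p.2 == t)).map (fun p => (p.1, 1 + ud.getD p.1 0))))

-- ===== PRECONDITION & SPEC =====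
def Spec_reverse_tags (tags : List (String × String)) (unigrams : List (String × Int)) (out : List (String × List (String × Int))) : Prop := out = reverse_tags_alt tags unigrams
instance (tags : List (String × String)) (unigrams : List (String × Int)) (out : List (String × List (String × Int))) : Decidable (Spec_reverse_tags tags unigrams out) := by unfold Spec_reverse_tags; infer_instance

-- ===== CLAIM (what is proved, stated in full; the proofs are below) =====
def Claim_equal_reverse_tags : Prop := ∀ (tags : List (String × String)) (unigrams : List (String × Int)), Dom_reverse_tags tags unigrams → Spec_reverse_tags tags unigrams (reverse_tags tags unigrams)

-- ===== LEMMAS AND PROOFS =====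

-- A's per-word step (init-if-absent, conditional weight, append) is one dict 'modify' with the
-- unconditional weight 1 + ud.getD word 0.
lemma stepA_eq_modify (ud : PySem.Dict String Int)
    (d : PySem.Dict String (List (String × Int))) (p : String × String) :
    ((if d.contains p.2 then d else d.insert p.2 []).insert p.2
      ((if d.contains p.2 then d else d.insert p.2 []).getD p.2 []
        ++ [(p.1, if ud.contains p.1 then 1 + ud.getD p.1 0 else 1)]))
    = d.modify p.2 [] (· ++ [(p.1, 1 + ud.getD p.1 0)]) := by
  have hw : (if ud.contains p.1 then 1 + ud.getD p.1 0 else 1) = 1 + ud.getD p.1 0 := by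
    by_cases h : ud.contains p.1
    · simp [h]
    · simp [h, PySem.Dict.getD_of_not_contains ud 0 (by simpa using h)]
  simp only [PySem.Dict.modify, hw]
  by_cases h : d.contains p.2
  · simp [h]
  · simp [h, PySem.Dict.insert_insert_self, PySem.Dict.getD_insert_self,
      PySem.Dict.getD_of_not_contains d [] (by simpa using h)]

-- Each entry of A's final dict, looked up by tag, is exactly B's per-tag comprehension.
lemma getD_groupFold (l : List (String × String)) (ud : PySem.Dict String Int) (t : String) :
    (l.foldl (fun (d : PySem.Dict String (List (String × Int))) p =>
        d.modify p.2 [] (· ++ [(p.1, 1 + ud.getD p.1 0)])) PySem.Dict.empty).getD t []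
    = (l.filter (fun p => p.2 == t)).map (fun p => (p.1, 1 + ud.getD p.1 0)) := by
  have hmap : (l.map (fun p => (p.2, (p.1, 1 + ud.getD p.1 0)))).foldl
      (fun (d : PySem.Dict String (List (String × Int))) q => d.modify q.1 [] (· ++ [q.2]))
      PySem.Dict.empty
      = l.foldl (fun (d : PySem.Dict String (List (String × Int))) p =>
          d.modify p.2 [] (· ++ [(p.1, 1 + ud.getD p.1 0)])) PySem.Dict.empty := by
    rw [List.foldl_map]
  rw [← hmap, PySem.Dict.getD_foldl_modify_append]
  simp [List.filter_map, List.map_map, Function.comp_def]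

theorem reverse_tags_spec : Claim_equal_reverse_tags := by
  unfold Claim_equal_reverse_tags Spec_reverse_tags
  intro tags unigrams _
  unfold reverse_tags reverse_tags_alt
  simp only []
  set td := PySem.Dict.ofList tags with htd
  set ud := PySem.Dict.ofList unigrams with hud
  -- replace A's step by the modify form
  have hfold := PySem.List.foldl_congr_mem td.items _
      (fun (d : PySem.Dict String (List (String × Int))) p =>
        d.modify p.2 [] (· ++ [(p.1, 1 + ud.getD p.1 0)]))
      PySem.Dict.empty
      (fun acc x _ => stepA_eq_modify ud acc x)
  rw [hfold]
  set rt := td.items.foldl (fun (d : PySem.Dict String (List (String × Int))) p =>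
      d.modify p.2 [] (· ++ [(p.1, 1 + ud.getD p.1 0)])) PySem.Dict.empty with hrt
  have hnd : rt.keys.Nodup := by
    rw [hrt]
    exact PySem.Dict.nodup_keys_foldl_modify_key td.items (fun p => p.2) []
      (fun d p => (· ++ [(p.1, 1 + ud.getD p.1 0)])) PySem.Dict.empty
      (by simp)
  have hkeys : rt.keys = PySem.List.dedup (td.items.map (fun p => p.2)) := by
    rw [hrt]
    rw [PySem.Dict.keys_foldl_modify_key td.items (fun p => p.2) []
      (fun d p => (· ++ [(p.1, 1 + ud.getD p.1 0)])) PySem.Dict.empty]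
    rfl
  rw [PySem.Dict.items_eq_map_keys rt hnd [], hkeys]
  exact List.map_congr_left (fun t _ => by rw [hrt, getD_groupFold])
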